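-- pv_equiv track=rewrite | github.com/jardimdanificado/atividade_merge_vetores | main.py | merge_vetores
-- ===== SOURCE A (Python) =====
-- def merge_vetores(a1, a2):
--     merged = a1 + a2
--     for i in range(len(merged)):
--         min = i
--         for j in range(i + 1, len(merged)):
--             if merged[j] < merged[min]:
--                 min = j
--         merged[i], merged[min] = merged[min], merged[i]
--     return merged
-- ===== SOURCE B (Python) =====
-- def merge_vetores(a1, a2):
--     return _msort(a1 + a2)
--
-- def _msort(xs):
--     if len(xs) <= 1:
--         return xs
--     mid = len(xs) // 2
--     return _merge(_msort(xs[:mid]), _msort(xs[mid:]))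
--
-- def _merge(l, r):
--     out = []
--     i = j = 0
--     while i < len(l) and j < len(r):
--         if l[i] <= r[j]:
--             out.append(l[i]); i += 1
--         else:
--             out.append(r[j]); j += 1
--     out.extend(l[i:])
--     out.extend(r[j:])
--     return out
-- ===== Notes on version B (the rewrite author's own statement) =====
-- stated objective: faster
-- what changed: Replaced the in-place selection sort (scan-for-min and swap, nested index loops) over the concatenation with a recursive top-down merge sort (split in halves, recurse, two-pointer merge).
import Mathlib
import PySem

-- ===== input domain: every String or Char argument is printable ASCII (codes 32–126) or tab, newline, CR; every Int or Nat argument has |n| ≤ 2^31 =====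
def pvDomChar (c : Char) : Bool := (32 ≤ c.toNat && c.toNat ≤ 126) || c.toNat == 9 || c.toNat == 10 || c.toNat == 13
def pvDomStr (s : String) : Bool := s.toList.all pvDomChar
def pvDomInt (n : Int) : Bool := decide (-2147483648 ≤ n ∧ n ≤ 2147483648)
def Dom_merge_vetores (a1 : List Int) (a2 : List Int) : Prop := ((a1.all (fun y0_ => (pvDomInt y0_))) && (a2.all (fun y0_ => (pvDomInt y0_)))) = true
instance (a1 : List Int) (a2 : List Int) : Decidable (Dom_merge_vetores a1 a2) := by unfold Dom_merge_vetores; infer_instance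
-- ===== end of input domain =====

-- B replaces A's in-place selection sort with a recursive top-down merge sort (asymptotically fewer comparisons).


-- ===== PORT A =====
-- inner loop: min = i; for j in range(i+1, len(merged)): if merged[j] < merged[min]: min = j
-- (all indices are nonnegative and in range, so pyGetD/pySetD coincide with Python's merged[...],
-- which never raises here)
def selMin (m : List Int) (i : Int) : Int :=
  (PySem.List.pyRange (i + 1) m.length 1).foldl
    (fun mn j => if PySem.List.pyGetD m j 0 < PySem.List.pyGetD m mn 0 then j else mn) i

-- outer loop body: merged[i], merged[min] = merged[min], merged[i]
def selStep (m : List Int) (i : Int) : List Int :=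
  let mn := selMin m i
  PySem.List.pySetD (PySem.List.pySetD m i (PySem.List.pyGetD m mn 0)) mn (PySem.List.pyGetD m i 0)

def merge_vetores (a1 : List Int) (a2 : List Int) : List Int :=
  let merged := a1 ++ a2
  (PySem.List.pyRange 0 merged.length 1).foldl selStep merged

-- ===== PORT B =====
-- the while-loop of _merge: `out` is the accumulator, the two lists are the unread suffixes l[i:], r[j:]
def bMerge (out l r : List Int) : List Int :=
  match l, r with
  | x :: xs, y :: ys =>
      if x ≤ y then bMerge (out ++ [x]) xs (y :: ys) else bMerge (out ++ [y]) (x :: xs) ys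
  | l, r => out ++ l ++ r
termination_by l.length + r.length

-- _msort: split at len//2, recurse, merge
def bSort (xs : List Int) : List Int :=
  if xs.length ≤ 1 then xs
  else
    let mid := xs.length / 2
    bMerge [] (bSort (xs.take mid)) (bSort (xs.drop mid))
termination_by xs.length
decreasing_by
  · simp only [List.length_take]; omega
  · simp only [List.length_drop]; omega

def merge_vetores_alt (a1 : List Int) (a2 : List Int) : List Int :=
  bSort (a1 ++ a2)

-- ===== PRECONDITION & SPEC =====
def Spec_merge_vetores (a1 : List Int) (a2 : List Int) (out : List Int) : Prop := out = merge_vetores_alt a1 a2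
instance (a1 : List Int) (a2 : List Int) (out : List Int) : Decidable (Spec_merge_vetores a1 a2 out) := by unfold Spec_merge_vetores; infer_instance

-- ===== CLAIM (what is proved, stated in full; the proofs are below) =====
def Claim_equal_merge_vetores : Prop := ∀ (a1 : List Int) (a2 : List Int), Dom_merge_vetores a1 a2 → Spec_merge_vetores a1 a2 (merge_vetores a1 a2)

-- ===== LEMMAS AND PROOFS =====

-- ---- B side: bSort is a sorted permutation of its input ----

theorem bMerge_eq_merge (l : List Int) : ∀ (r out : List Int),
    bMerge out l r = out ++ List.merge l r (fun a b => a ≤ b) := by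
  induction l with
  | nil => intro r out; cases r <;> simp [bMerge]
  | cons x xs ih =>
    intro r out
    induction r generalizing out with
    | nil => simp [bMerge]
    | cons y ys ihr =>
      by_cases h : x ≤ y
      · simp [bMerge, h, ih]
      · simp [bMerge, h, ihr]

theorem bSort_perm (xs : List Int) : (bSort xs).Perm xs := by
  fun_induction bSort with
  | case1 xs h => exact List.Perm.refl _
  | case2 xs h mid ih1 ih2 =>
    rw [bMerge_eq_merge]
    simp only [List.nil_append]
    have h1 := List.merge_perm_append (xs := bSort (xs.take mid))
      (ys := bSort (xs.drop mid)) (fun a b : Int => a ≤ b)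
    have h2 := List.Perm.append ih1 ih2
    have h3 : xs.take mid ++ xs.drop mid = xs := List.take_append_drop mid xs
    rw [h3] at h2
    exact h1.trans h2

theorem bSort_pairwise (xs : List Int) : (bSort xs).Pairwise (· ≤ ·) := by
  fun_induction bSort with
  | case1 xs h =>
    match xs with
    | [] => simp
    | [a] => simp
    | a :: b :: t => simp at h
  | case2 xs h mid ih1 ih2 =>
    rw [bMerge_eq_merge]
    simpa using List.Pairwise.merge ih1 ih2

-- ---- A side: the selection sort computes a sorted permutation ----

-- pyGetD at a nonnegative index is List.getD
theorem pyGetD_nonneg (m : List Int) (j : Int) (h : 0 ≤ j) :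
    PySem.List.pyGetD m j 0 = m.getD j.toNat 0 := by
  obtain ⟨n, rfl⟩ := Int.eq_ofNat_of_zero_le h
  simp

-- spec of the inner argmin fold, starting scan position a with current candidate acc
theorem selMinFold_spec (m : List Int) : ∀ (k : Nat) (a acc : Int), a = (m.length : Int) - k →
    0 ≤ a → 0 ≤ acc → acc.toNat < m.length →
    (let r := (PySem.List.pyRange a m.length 1).foldl
        (fun mn j => if PySem.List.pyGetD m j 0 < PySem.List.pyGetD m mn 0 then j else mn) acc
     0 ≤ r ∧ r.toNat < m.length ∧ (r = acc ∨ a ≤ r) ∧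
       m.getD r.toNat 0 ≤ m.getD acc.toNat 0 ∧
       ∀ j : Int, a ≤ j → j < m.length → m.getD r.toNat 0 ≤ m.getD j.toNat 0) := by
  intro k
  induction k with
  | zero =>
    intro a acc ha ha0 h0 hlt
    rw [PySem.List.pyRange_one_eq_nil (by omega)]
    refine ⟨h0, hlt, Or.inl rfl, le_refl _, ?_⟩
    intro j hja hjl; omega
  | succ k ih =>
    intro a acc ha ha0 h0 hlt
    by_cases hab : a < (m.length : Int)
    · rw [PySem.List.pyRange_one_cons hab]
      simp only [List.foldl_cons]
      set acc' := if PySem.List.pyGetD m a 0 < PySem.List.pyGetD m acc 0 then a else acc with hacc'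
      have h0' : 0 ≤ acc' := by rw [hacc']; split <;> omega
      have hlt' : acc'.toNat < m.length := by rw [hacc']; split <;> omega
      have hval : m.getD acc'.toNat 0 ≤ m.getD acc.toNat 0 ∧ m.getD acc'.toNat 0 ≤ m.getD a.toNat 0 := by
        rw [hacc']; split
        · rename_i hc
          rw [pyGetD_nonneg m a ha0, pyGetD_nonneg m acc h0] at hc
          exact ⟨le_of_lt hc, le_refl _⟩
        · rename_i hc
          rw [pyGetD_nonneg m a ha0, pyGetD_nonneg m acc h0] at hc
          exact ⟨le_refl _, by omega⟩
      obtain ⟨r0, rlt, rloc, rle, rall⟩ := ih (a + 1) acc' (by omega) (by omega) h0' hlt'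
      refine ⟨r0, rlt, ?_, le_trans rle hval.1, ?_⟩
      · rcases rloc with h | h
        · rw [h, hacc']; split
          · exact Or.inr (le_refl _)
          · exact Or.inl rfl
        · exact Or.inr (by omega)
      · intro j hja hjl
        rcases eq_or_lt_of_le hja with h | h
        · subst h; exact le_trans rle hval.2
        · exact rall j (by omega) hjl
    · rw [PySem.List.pyRange_one_eq_nil (by omega)]
      refine ⟨h0, hlt, Or.inl rfl, le_refl _, ?_⟩
      intro j hja hjl; omega

theorem selMin_spec (m : List Int) (i : Int) (h0 : 0 ≤ i) (hlt : i.toNat < m.length) :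
    0 ≤ selMin m i ∧ (selMin m i).toNat < m.length ∧ i ≤ selMin m i ∧
      ∀ j : Int, i ≤ j → j < m.length → m.getD (selMin m i).toNat 0 ≤ m.getD j.toNat 0 := by
  unfold selMin
  obtain ⟨r0, rlt, rloc, rle, rall⟩ :=
    selMinFold_spec m ((m.length : Int) - (i + 1)).toNat (i + 1) i (by omega) (by omega) h0 hlt
  refine ⟨r0, rlt, by rcases rloc with h | h <;> omega, ?_⟩
  intro j hij hjl
  rcases eq_or_lt_of_le hij with h | h
  · subst h; exact rle
  · exact rall j (by omega) hjl

-- prefix invariant: every position below i is ≤ every later position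
def Pref (i : Int) (m : List Int) : Prop :=
  ∀ p q : Nat, (p : Int) < i → p < q → q < m.length → m.getD p 0 ≤ m.getD q 0

theorem getD_set_eq (m : List Int) (k : Nat) (v : Int) (p : Nat) (hk : k < m.length) :
    (m.set k v).getD p 0 = if p = k then v else m.getD p 0 := by
  simp only [List.getD_eq_getElem?_getD, List.getElem?_set]
  split
  · rename_i h; subst h; simp
  · rename_i h; rw [if_neg (fun hh => h hh.symm)]

theorem selStep_spec (m : List Int) (i : Int) (h0 : 0 ≤ i) (hlt : i.toNat < m.length)
    (hp : Pref i m) :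
    (selStep m i).Perm m ∧ (selStep m i).length = m.length ∧ Pref (i + 1) (selStep m i) := by
  obtain ⟨m0, mlt, mge, mall⟩ := selMin_spec m i h0 hlt
  set mn := selMin m i with hmn
  have hstep : selStep m i = (m.set i.toNat (m.getD mn.toNat 0)).set mn.toNat (m.getD i.toNat 0) := by
    rw [selStep, ← hmn, PySem.List.pySetD_of_nonneg _ _ h0, PySem.List.pySetD_of_nonneg _ _ m0,
      pyGetD_nonneg m mn m0, pyGetD_nonneg m i h0]
  have hgd1 : m.getD mn.toNat 0 = m[mn.toNat] := List.getD_eq_getElem m 0 mlt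
  have hgd2 : m.getD i.toNat 0 = m[i.toNat] := List.getD_eq_getElem m 0 hlt
  have hperm : (selStep m i).Perm m := by
    rw [hstep, hgd1, hgd2]; exact List.set_set_perm hlt mlt
  have hlen : (selStep m i).length = m.length := hperm.length_eq
  refine ⟨hperm, hlen, ?_⟩
  -- value at any position of the swapped list
  have hget : ∀ p : Nat, p < m.length →
      (selStep m i).getD p 0 =
        if p = mn.toNat then m.getD i.toNat 0
        else if p = i.toNat then m.getD mn.toNat 0 else m.getD p 0 := by
    intro p hpl
    rw [hstep, getD_set_eq _ _ _ _ (by simpa using mlt), getD_set_eq _ _ _ _ hlt]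
  intro p q hpi hpq hql
  rw [hlen] at hql
  have hpl : p < m.length := lt_trans hpq hql
  rw [hget p hpl, hget q hql]
  have hmin : ∀ j : Nat, i.toNat ≤ j → j < m.length → m.getD mn.toNat 0 ≤ m.getD j 0 := by
    intro j hj1 hj2
    have := mall (j : Int) (by omega) (by omega)
    simpa using this
  by_cases hpilt : (p : Int) < i
  · -- p is in the already-sorted prefix: its value is unchanged
    have hpne1 : p ≠ mn.toNat := by omega
    have hpne2 : p ≠ i.toNat := by omega
    rw [if_neg hpne1, if_neg hpne2]
    split
    · exact hp p i.toNat hpilt (by omega) hlt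
    · split
      · exact hp p mn.toNat hpilt (by omega) (by omega)
      · exact hp p q hpilt hpq hql
  · -- p = i: its new value is the minimum of the tail
    have hpi' : p = i.toNat := by omega
    have hpne1 : ¬ (p = mn.toNat ∧ mn.toNat ≠ i.toNat) := by
      rintro ⟨h1, h2⟩; omega
    have hpv : (if p = mn.toNat then m.getD i.toNat 0
        else if p = i.toNat then m.getD mn.toNat 0 else m.getD p 0) = m.getD mn.toNat 0 := by
      by_cases h : p = mn.toNat
      · rw [if_pos h]
        have : mn.toNat = i.toNat := by by_contra hne; exact hpne1 ⟨h, hne⟩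
        rw [this]
      · rw [if_neg h, if_pos hpi']
    rw [hpv]
    split
    · exact hmin i.toNat (le_refl _) hlt
    · split
      · exact le_refl _
      · exact hmin q (by omega) hql

theorem outer_loop (N : Nat) : ∀ (k : Nat) (i : Int) (m : List Int), i = (N : Int) - k → 0 ≤ i →
    m.length = N → Pref i m →
    (((PySem.List.pyRange i N 1).foldl selStep m).Perm m ∧
      ((PySem.List.pyRange i N 1).foldl selStep m).length = N ∧
      Pref (N : Int) ((PySem.List.pyRange i N 1).foldl selStep m)) := by
  intro k
  induction k with
  | zero =>
    intro i m hi h0 hlen hp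
    rw [PySem.List.pyRange_one_eq_nil (by omega)]
    refine ⟨List.Perm.refl _, hlen, ?_⟩
    have hiN : i = (N : Int) := by omega
    rw [hiN] at hp
    simpa using hp
  | succ k ih =>
    intro i m hi h0 hlen hp
    by_cases hib : i < (N : Int)
    · rw [PySem.List.pyRange_one_cons hib]
      simp only [List.foldl_cons]
      obtain ⟨hperm, hlen', hp'⟩ := selStep_spec m i h0 (by omega) hp
      obtain ⟨P, L, Q⟩ := ih (i + 1) (selStep m i) (by omega) (by omega) (by omega) hp'
      exact ⟨P.trans hperm, L, Q⟩
    · rw [PySem.List.pyRange_one_eq_nil (by omega)]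
      refine ⟨List.Perm.refl _, hlen, ?_⟩
      have hiN : i = (N : Int) := by omega
      rw [hiN] at hp
      simpa using hp

theorem pref_pairwise (m : List Int) (h : Pref (m.length : Int) m) : m.Pairwise (· ≤ ·) := by
  rw [List.pairwise_iff_getElem]
  intro a b ha hb hab
  have := h a b (by omega) hab hb
  rwa [List.getD_eq_getElem m 0 ha, List.getD_eq_getElem m 0 hb] at this

theorem merge_vetores_sorted_perm (a1 a2 : List Int) :
    (merge_vetores a1 a2).Perm (a1 ++ a2) ∧ (merge_vetores a1 a2).Pairwise (· ≤ ·) := by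
  have h := outer_loop (a1 ++ a2).length (a1 ++ a2).length 0 (a1 ++ a2) (by omega) (by omega) rfl
    (by intro p q hp hpq hql; omega)
  obtain ⟨P, L, Q⟩ := h
  refine ⟨P, ?_⟩
  have := pref_pairwise _ (by rwa [L])
  exact this

-- ===== VERDICT (by name: the statement is the Claim_ definition above) =====
theorem merge_vetores_spec : Claim_equal_merge_vetores := by
  intro a1 a2 _
  unfold Spec_merge_vetores
  obtain ⟨P, S⟩ := merge_vetores_sorted_perm a1 a2
  have PB : (merge_vetores_alt a1 a2).Perm (a1 ++ a2) := bSort_perm (a1 ++ a2)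
  have SB : (merge_vetores_alt a1 a2).Pairwise (· ≤ ·) := bSort_pairwise (a1 ++ a2)
  exact PySem.List.eq_of_perm_of_pairwise_le (P.trans PB.symm) S SB
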